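-- pv_equiv track=rewrite | github.com/siveax/5AHWII-SWP-RubnS | lernen/TempFehlwerte.py | fehlwerte_filtern
-- ===== SOURCE A (Python) =====
-- def fehlwerte_filtern(datenliste):
--
--     bereinigte_liste = []
--     fehler_count = 0
--
--     for temp in datenliste:
--         if -60 <= temp <= 60:
--             bereinigte_liste.append(temp)
--         else:
--             fehler_count += 1
--
--     return bereinigte_liste, fehler_count
-- ===== SOURCE B (Python) =====
-- def fehlwerte_filtern(datenliste):
--     datenliste = list(datenliste)
--
--     def go(xs):
--         # divide and conquer: split in half, recurse, combine kept lists and counts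
--         if len(xs) == 0:
--             return [], 0
--         if len(xs) == 1:
--             t = xs[0]
--             if -60 <= t <= 60:
--                 return [t], 0
--             return [], 1
--         mid = len(xs) // 2
--         l1, c1 = go(xs[:mid])
--         l2, c2 = go(xs[mid:])
--         return l1 + l2, c1 + c2
--
--     return go(datenliste)
-- ===== Notes on version B (the rewrite author's own statement) =====
-- stated objective: alternative
-- what changed: Replaces A's single linear pass with two accumulators by a divide-and-conquer recursion that splits the list in half, filters/counts each half recursively and concatenates kept lists and adds error counts; correct because filtering and counting distribute over concatenation.
import Mathlib
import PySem

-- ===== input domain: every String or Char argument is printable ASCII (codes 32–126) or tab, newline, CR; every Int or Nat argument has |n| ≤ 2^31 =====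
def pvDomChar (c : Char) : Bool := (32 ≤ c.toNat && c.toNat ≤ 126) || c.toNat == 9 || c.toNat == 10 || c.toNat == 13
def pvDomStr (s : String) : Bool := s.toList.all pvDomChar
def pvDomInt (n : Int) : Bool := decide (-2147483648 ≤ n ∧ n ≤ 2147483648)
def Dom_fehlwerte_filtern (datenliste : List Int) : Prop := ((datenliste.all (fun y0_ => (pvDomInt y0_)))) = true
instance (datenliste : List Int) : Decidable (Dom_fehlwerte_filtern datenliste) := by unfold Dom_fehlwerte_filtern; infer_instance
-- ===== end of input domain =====

-- B replaces A's single accumulator loop by a divide-and-conquer recursion (objective: alternative).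

-- ===== PORT A =====
-- Literal port of A: one loop carrying (bereinigte_liste, fehler_count).
def fehlwerte_filtern (datenliste : List Int) : List Int × Int :=
  datenliste.foldl
    (fun (st : List Int × Int) temp =>
      if -60 ≤ temp ∧ temp ≤ 60 then (st.1 ++ [temp], st.2) else (st.1, st.2 + 1))
    ([], 0)

-- ===== PORT B =====
-- Port of B's helper go: split the list at len//2, recurse on both halves, combine.
-- xs[:mid] / xs[mid:] with 0 ≤ mid ≤ len are exactly List.take / List.drop.
def fehlwerte_go : List Int → List Int × Int
  | [] => ([], 0)
  | [t] => if -60 ≤ t ∧ t ≤ 60 then ([t], 0) else ([], 1)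
  | a :: b :: rest =>
    let mid := (a :: b :: rest).length / 2
    let r1 := fehlwerte_go ((a :: b :: rest).take mid)
    let r2 := fehlwerte_go ((a :: b :: rest).drop mid)
    (r1.1 ++ r2.1, r1.2 + r2.2)
termination_by xs => xs.length
decreasing_by
  · simp [List.length_take]; omega
  · simp [List.length_drop]; omega

def fehlwerte_filtern_alt (datenliste : List Int) : List Int × Int :=
  fehlwerte_go datenliste

-- ===== PRECONDITION & SPEC =====
def Spec_fehlwerte_filtern (datenliste : List Int) (out : List Int × Int) : Prop := out = fehlwerte_filtern_alt datenliste
instance (datenliste : List Int) (out : List Int × Int) : Decidable (Spec_fehlwerte_filtern datenliste out) := by unfold Spec_fehlwerte_filtern; infer_instance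

-- ===== CLAIM (what is proved, stated in full; the proofs are below) =====
def Claim_equal_fehlwerte_filtern : Prop := ∀ (datenliste : List Int), Dom_fehlwerte_filtern datenliste → Spec_fehlwerte_filtern datenliste (fehlwerte_filtern datenliste)

-- ===== LEMMAS AND PROOFS =====

-- A's loop invariant: from (acc, c) the fold returns acc ++ filter and c + (# dropped).
theorem fehlwerte_filtern_fold (datenliste : List Int) (acc : List Int) (c : Int) :
    datenliste.foldl
      (fun (st : List Int × Int) temp =>
        if -60 ≤ temp ∧ temp ≤ 60 then (st.1 ++ [temp], st.2) else (st.1, st.2 + 1))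
      (acc, c)
    = (acc ++ datenliste.filter (fun temp => decide (-60 ≤ temp ∧ temp ≤ 60)),
       c + (datenliste.length : Int)
         - ((datenliste.filter (fun temp => decide (-60 ≤ temp ∧ temp ≤ 60))).length : Int)) := by
  induction datenliste generalizing acc c with
  | nil => simp
  | cons x xs ih =>
    simp only [List.foldl, List.filter, List.length_cons]
    by_cases h : -60 ≤ x ∧ x ≤ 60
    · rw [if_pos h, ih]
      simp [h]
      ring
    · rw [if_neg h, ih]
      simp [h]
      ring

-- Characterisation of B's divide-and-conquer: it computes filter and # dropped.
theorem fehlwerte_go_eq (xs : List Int) :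
    fehlwerte_go xs
    = (xs.filter (fun temp => decide (-60 ≤ temp ∧ temp ≤ 60)),
       (xs.length : Int)
         - ((xs.filter (fun temp => decide (-60 ≤ temp ∧ temp ≤ 60))).length : Int)) := by
  induction xs using fehlwerte_go.induct with
  | case1 => simp [fehlwerte_go]
  | case2 t h => simp [fehlwerte_go, h]
  | case3 t h => simp [fehlwerte_go, h]
  | case4 a b rest mid ih1 ih2 =>
    rw [fehlwerte_go, ih1, ih2]
    have hsplit := List.take_append_drop ((a :: b :: rest).length / 2) (a :: b :: rest)
    simp only [Prod.mk.injEq]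
    constructor
    · conv_rhs => rw [← hsplit]
      rw [List.filter_append]
    · conv_rhs => rw [← hsplit]
      rw [List.filter_append, List.length_append, List.length_append]
      push_cast
      ring

-- ===== VERDICT (by name: the statement is the Claim_ definition above) =====
theorem fehlwerte_filtern_spec : Claim_equal_fehlwerte_filtern := by
  intro l _
  unfold Spec_fehlwerte_filtern fehlwerte_filtern fehlwerte_filtern_alt
  rw [fehlwerte_filtern_fold, fehlwerte_go_eq]
  simp
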